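-- pv_equiv track=rewrite | github.com/tconbeer/harlequin | src/harlequin_sqlite/adapter.py | _short_column_type
-- ===== SOURCE A (Python) =====
-- def _short_column_type(raw_type: str) -> str:
--     # first get the storage affinity for a type decl
--     if raw_type is None or raw_type == "":
--         affinity = ""
--
--     typ = raw_type.lower()
--     if "int" in typ:
--         affinity = "INTEGER"
--     elif any([x in typ for x in ["char", "clob", "text"]]):
--         affinity = "TEXT"
--     elif "blob" in typ:
--         affinity = "BLOB"
--     elif any([x in typ for x in ["real", "floa", "doub"]]):
--         affinity = "REAL"
--     else:
--         affinity = "NUMERIC"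
--
--     # then lookup the abbreviation for the affinity
--     mapping = {
--         "": "",
--         "TEXT": "s",
--         "NUMERIC": "#.#",
--         "INTEGER": "##",
--         "REAL": "#.#",
--         "BLOB": "b",
--     }
--     return mapping.get(affinity, "?")
-- ===== SOURCE B (Python) =====
-- _KW = {"int": 0, "char": 1, "clob": 1, "text": 1, "blob": 2, "real": 3, "floa": 3, "doub": 3}
-- _ABBR = ["##", "s", "b", "#.#"]
--
--
-- def _short_column_type(raw_type: str) -> str:
--     # Single left-to-right window scan: at each position look the 3- and 4-char
--     # windows up in a keyword->priority dict and keep the minimum priority seen.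
--     typ = raw_type.lower()
--     best = 4
--     for i in range(len(typ)):
--         for w in (typ[i:i + 3], typ[i:i + 4]):
--             p = _KW.get(w)
--             if p is not None and p < best:
--                 best = p
--     return _ABBR[best] if best < 4 else "#.#"
-- ===== Notes on version B (the rewrite author's own statement) =====
-- stated objective: alternative
-- what changed: Replaced the staged substring searches (one 'in' scan per keyword to pick an affinity name, then a dict lookup for the abbreviation) with a single left-to-right window scan: each 3- and 4-character window is looked up in one keyword-to-priority dict and the minimum priority seen selects the abbreviation, defaulting to the NUMERIC abbreviation.
import Mathlib
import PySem

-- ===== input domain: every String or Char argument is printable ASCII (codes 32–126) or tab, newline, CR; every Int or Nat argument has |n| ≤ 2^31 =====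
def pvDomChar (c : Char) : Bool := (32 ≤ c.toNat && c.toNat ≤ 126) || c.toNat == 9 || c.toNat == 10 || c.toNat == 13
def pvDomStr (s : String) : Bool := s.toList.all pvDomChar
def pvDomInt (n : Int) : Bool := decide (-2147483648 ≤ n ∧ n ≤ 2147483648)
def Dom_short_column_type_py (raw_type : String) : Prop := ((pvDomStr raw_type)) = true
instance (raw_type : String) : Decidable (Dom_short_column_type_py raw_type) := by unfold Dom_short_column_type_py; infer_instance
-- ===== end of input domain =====

-- B replaces A's staged per-keyword substring searches and affinity dict with a single window scan
-- keeping the minimum keyword priority (objective: alternative).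


-- ===== PORT A =====
-- (A's first 'if raw_type is None or raw_type == ""' assignment is dead: 'affinity' is
-- unconditionally reassigned by the following if/elif chain, so it is not reproduced.)
def short_column_type_py (raw_type : String) : String :=
  let typ := PySem.Str.lower raw_type
  let affinity :=
    if PySem.Str.isIn "int" typ then "INTEGER"
    else if ["char", "clob", "text"].any (fun x => PySem.Str.isIn x typ) then "TEXT"
    else if PySem.Str.isIn "blob" typ then "BLOB"
    else if ["real", "floa", "doub"].any (fun x => PySem.Str.isIn x typ) then "REAL"
    else "NUMERIC"
  PySem.Dict.getD (PySem.Dict.ofList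
    [("", ""), ("TEXT", "s"), ("NUMERIC", "#.#"), ("INTEGER", "##"), ("REAL", "#.#"), ("BLOB", "b")])
    affinity "?"

-- ===== PORT B =====
-- window-scan re-implementation: the keyword -> priority dict of Source B …
def pvKW : PySem.Dict String Int := PySem.Dict.ofList
  [("int", 0), ("char", 1), ("clob", 1), ("text", 1), ("blob", 2), ("real", 3), ("floa", 3), ("doub", 3)]

-- … and the priority -> abbreviation table
def pvABBR : List String := ["##", "s", "b", "#.#"]

def short_column_type_py_alt (raw_type : String) : String :=
  let typ := PySem.Str.lower raw_type
  let best := (PySem.List.pyRange 0 (PySem.Str.len typ) 1).foldl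
    (fun best i =>
      [PySem.Str.slice typ (some i) (some (i + 3)), PySem.Str.slice typ (some i) (some (i + 4))].foldl
        (fun best w =>
          match PySem.Dict.get? pvKW w with
          | some p => if p < best then p else best
          | none => best) best) 4
  if best < 4 then PySem.List.pyGetD pvABBR best "#.#" else "#.#"

-- ===== PRECONDITION & SPEC =====
def Spec_short_column_type_py (raw_type : String) (out : String) : Prop := out = short_column_type_py_alt raw_type
instance (raw_type : String) (out : String) : Decidable (Spec_short_column_type_py raw_type out) := by unfold Spec_short_column_type_py; infer_instance

-- ===== CLAIM (what is proved, stated in full; the proofs are below) =====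
def Claim_equal_short_column_type_py : Prop := ∀ (raw_type : String), Dom_short_column_type_py raw_type → Spec_short_column_type_py raw_type (short_column_type_py raw_type)

-- ===== LEMMAS AND PROOFS =====
lemma pvKW_eq : pvKW = PySem.Dict.mk
  [("int", 0), ("char", 1), ("clob", 1), ("text", 1), ("blob", 2), ("real", 3), ("floa", 3), ("doub", 3)] := by decide

def pvStep (b : Int) (w : String) : Int :=
  match PySem.Dict.get? pvKW w with
  | some p => if p < b then p else b
  | none => b

def pvGd (w : String) : Int := PySem.Dict.getD pvKW w 4

lemma pvGd_le_iff (w : String) (p : Int) (hp : p < 4) :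
    pvGd w ≤ p ↔
      (("int" = w ∧ 0 ≤ p) ∨ (("char" = w ∨ "clob" = w ∨ "text" = w) ∧ 1 ≤ p) ∨
       ("blob" = w ∧ 2 ≤ p) ∨ (("real" = w ∨ "floa" = w ∨ "doub" = w) ∧ 3 ≤ p)) := by
  unfold pvGd
  rw [pvKW_eq]
  simp [PySem.Dict.getD, PySem.Dict.get?, List.find?_cons]
  (repeat' split) <;> simp_all <;> omega

lemma pvStep_le_iff (b p : Int) (hp : p < 4) (w : String) :
    pvStep b w ≤ p ↔ (b ≤ p ∨ pvGd w ≤ p) := by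
  unfold pvStep pvGd
  have : PySem.Dict.getD pvKW w 4 = (PySem.Dict.get? pvKW w).getD 4 := rfl
  rw [this]
  cases h : PySem.Dict.get? pvKW w with
  | none => simp; omega
  | some q => simp; split_ifs <;> omega

lemma pvStep_le_self (b : Int) (w : String) : pvStep b w ≤ b := by
  unfold pvStep
  cases h : PySem.Dict.get? pvKW w with
  | none => simp
  | some q => simp; split_ifs <;> omega

lemma pvStep_nonneg (b : Int) (w : String) (hb : 0 ≤ b) : 0 ≤ pvStep b w := by
  unfold pvStep
  have hq : ∀ q, PySem.Dict.get? pvKW w = some q → 0 ≤ q := by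
    rw [pvKW_eq]
    simp [PySem.Dict.get?, List.find?_cons]
    (repeat' split) <;> simp_all
  cases h : PySem.Dict.get? pvKW w with
  | none => simpa
  | some q => have := hq q h; simp; split_ifs <;> omega

lemma pvFoldl_le_iff {α : Type} (g : α → Int) (p : Int)
    (STEP : Int → α → Int)
    (h : ∀ b i, STEP b i ≤ p ↔ (b ≤ p ∨ g i ≤ p)) :
    ∀ (l : List α) (b : Int), l.foldl STEP b ≤ p ↔ (b ≤ p ∨ ∃ i ∈ l, g i ≤ p) := by
  intro l
  induction l with
  | nil => simp
  | cons a l ih =>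
    intro b
    simp only [List.foldl_cons, ih, h, List.mem_cons]
    constructor
    · rintro (⟨hb | hg⟩ | ⟨i, hi, hgi⟩)
      · exact Or.inl hb
      · exact Or.inr ⟨a, Or.inl rfl, hg⟩
      · exact Or.inr ⟨i, Or.inr hi, hgi⟩
    · rintro (hb | ⟨i, (rfl | hi), hgi⟩)
      · exact Or.inl (Or.inl hb)
      · exact Or.inl (Or.inr hgi)
      · exact Or.inr ⟨i, hi, hgi⟩

lemma pvFoldl_bounds {α : Type} (STEP : Int → α → Int)
    (hle : ∀ b i, STEP b i ≤ b) (hnn : ∀ b i, 0 ≤ b → 0 ≤ STEP b i) :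
    ∀ (l : List α) (b : Int), 0 ≤ b → 0 ≤ l.foldl STEP b ∧ l.foldl STEP b ≤ b := by
  intro l
  induction l with
  | nil => simp
  | cons a l ih =>
    intro b hb
    have h1 := hle b a
    have h2 := hnn b a hb
    have := ih (STEP b a) h2
    exact ⟨this.1, le_trans this.2 h1⟩

lemma pvWindow_iff (t kw : List Char) (hne : kw ≠ []) (m₁ m₂ : Nat)
    (hm : kw.length = m₁ ∨ kw.length = m₂) :
    (∃ k, k < t.length ∧ ((t.drop k).take m₁ = kw ∨ (t.drop k).take m₂ = kw)) ↔
      PySem.Chars.isIn kw t = true := by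
  rw [← PySem.Chars.exists_prefix_drop_iff_isIn]
  constructor
  · rintro ⟨k, _, (h | h)⟩ <;> exact ⟨k, h ▸ List.take_prefix _ _⟩
  · rintro ⟨j, hj⟩
    have hjlt : j < t.length := by
      by_contra hge
      have hdrop : t.drop j = [] := List.drop_eq_nil_of_le (by omega)
      rw [hdrop] at hj
      exact hne (List.prefix_nil.mp hj)
    refine ⟨j, hjlt, ?_⟩
    have htake := (List.prefix_iff_eq_take.mp hj).symm
    rcases hm with hm | hm
    · exact Or.inl (by rw [← hm]; exact htake)
    · exact Or.inr (by rw [← hm]; exact htake)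
lemma pvSlice_toList (s : String) (k n : Nat) :
    (PySem.Str.slice s (some (k:Int)) (some ((k:Int)+(n:Int)))).toList = (s.toList.drop k).take n := by
  simp [PySem.List.slice_natCast_add]

lemma pvOcc_iff (typ kw : String) (hne : kw.toList ≠ []) (hm : kw.toList.length = 3 ∨ kw.toList.length = 4) :
    (∃ i ∈ PySem.List.pyRange 0 (PySem.Str.len typ) 1,
       (kw = PySem.Str.slice typ (some i) (some (i + 3)) ∨
        kw = PySem.Str.slice typ (some i) (some (i + 4)))) ↔
      PySem.Chars.isIn kw.toList typ.toList = true := by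
  rw [← pvWindow_iff typ.toList kw.toList hne 3 4 hm]
  constructor
  · rintro ⟨i, hi, hor⟩
    rw [PySem.List.mem_pyRange_one] at hi
    obtain ⟨h0, hlt⟩ := hi
    have hlen : PySem.Str.len typ = (typ.toList.length : Int) := by simp
    rw [hlen] at hlt
    refine ⟨i.toNat, by omega, ?_⟩
    have hcast : (i.toNat : Int) = i := Int.toNat_of_nonneg h0
    rcases hor with h | h
    · left
      have := congrArg String.toList h
      rw [this]
      rw [← hcast, show ((i.toNat : Int) + 3) = ((i.toNat : Int) + ((3:Nat) : Int)) by norm_num]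
      rw [pvSlice_toList typ i.toNat 3]
      congr 2
    · right
      have := congrArg String.toList h
      rw [this]
      rw [← hcast, show ((i.toNat : Int) + 4) = ((i.toNat : Int) + ((4:Nat) : Int)) by norm_num]
      rw [pvSlice_toList typ i.toNat 4]
      congr 2
  · rintro ⟨k, hk, hor⟩
    refine ⟨(k : Int), ?_, ?_⟩
    · rw [PySem.List.mem_pyRange_one]
      constructor
      · positivity
      · simpa using hk
    · rcases hor with h | h
      · left
        rw [← String.toList_inj]
        rw [show (((k:Int)) + 3) = ((k : Int) + ((3:Nat) : Int)) by norm_num]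
        rw [pvSlice_toList typ k 3]
        exact h.symm
      · right
        rw [← String.toList_inj]
        rw [show (((k:Int)) + 4) = ((k : Int) + ((4:Nat) : Int)) by norm_num]
        rw [pvSlice_toList typ k 4]
        exact h.symm
lemma pvKey (typ : String) (p : Int) (hp : p < 4) :
    ((PySem.List.pyRange 0 (PySem.Str.len typ) 1).foldl
      (fun best i =>
        pvStep (pvStep best (PySem.Str.slice typ (some i) (some (i + 3))))
          (PySem.Str.slice typ (some i) (some (i + 4)))) 4 ≤ p) ↔
    ((0 ≤ p ∧ PySem.Chars.isIn "int".toList typ.toList = true) ∨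
     (1 ≤ p ∧ (PySem.Chars.isIn "char".toList typ.toList = true ∨
               PySem.Chars.isIn "clob".toList typ.toList = true ∨
               PySem.Chars.isIn "text".toList typ.toList = true)) ∨
     (2 ≤ p ∧ PySem.Chars.isIn "blob".toList typ.toList = true) ∨
     (3 ≤ p ∧ (PySem.Chars.isIn "real".toList typ.toList = true ∨
               PySem.Chars.isIn "floa".toList typ.toList = true ∨
               PySem.Chars.isIn "doub".toList typ.toList = true))) := by
  rw [pvFoldl_le_iff
        (fun i => min (pvGd (PySem.Str.slice typ (some i) (some (i + 3))))
                      (pvGd (PySem.Str.slice typ (some i) (some (i + 4))))) p _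
        (fun b i => by
          rw [pvStep_le_iff _ p hp, pvStep_le_iff _ p hp, min_le_iff]
          tauto)]
  have h4 : ¬ (4 : Int) ≤ p := by omega
  simp only [h4, false_or]
  constructor
  · rintro ⟨i, hi, hg⟩
    rw [min_le_iff] at hg
    rcases hg with hg | hg <;>
      rw [pvGd_le_iff _ p hp] at hg <;>
      rcases hg with ⟨he, hp'⟩ | ⟨(he | he | he), hp'⟩ | ⟨he, hp'⟩ | ⟨(he | he | he), hp'⟩ <;>
      [ exact Or.inl ⟨hp', (pvOcc_iff typ "int" (by decide) (by decide)).mp ⟨i, hi, Or.inl he⟩⟩;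
        exact Or.inr (Or.inl ⟨hp', Or.inl ((pvOcc_iff typ "char" (by decide) (by decide)).mp ⟨i, hi, Or.inl he⟩)⟩);
        exact Or.inr (Or.inl ⟨hp', Or.inr (Or.inl ((pvOcc_iff typ "clob" (by decide) (by decide)).mp ⟨i, hi, Or.inl he⟩))⟩);
        exact Or.inr (Or.inl ⟨hp', Or.inr (Or.inr ((pvOcc_iff typ "text" (by decide) (by decide)).mp ⟨i, hi, Or.inl he⟩))⟩);
        exact Or.inr (Or.inr (Or.inl ⟨hp', (pvOcc_iff typ "blob" (by decide) (by decide)).mp ⟨i, hi, Or.inl he⟩⟩));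
        exact Or.inr (Or.inr (Or.inr ⟨hp', Or.inl ((pvOcc_iff typ "real" (by decide) (by decide)).mp ⟨i, hi, Or.inl he⟩)⟩));
        exact Or.inr (Or.inr (Or.inr ⟨hp', Or.inr (Or.inl ((pvOcc_iff typ "floa" (by decide) (by decide)).mp ⟨i, hi, Or.inl he⟩))⟩));
        exact Or.inr (Or.inr (Or.inr ⟨hp', Or.inr (Or.inr ((pvOcc_iff typ "doub" (by decide) (by decide)).mp ⟨i, hi, Or.inl he⟩))⟩));
        exact Or.inl ⟨hp', (pvOcc_iff typ "int" (by decide) (by decide)).mp ⟨i, hi, Or.inr he⟩⟩;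
        exact Or.inr (Or.inl ⟨hp', Or.inl ((pvOcc_iff typ "char" (by decide) (by decide)).mp ⟨i, hi, Or.inr he⟩)⟩);
        exact Or.inr (Or.inl ⟨hp', Or.inr (Or.inl ((pvOcc_iff typ "clob" (by decide) (by decide)).mp ⟨i, hi, Or.inr he⟩))⟩);
        exact Or.inr (Or.inl ⟨hp', Or.inr (Or.inr ((pvOcc_iff typ "text" (by decide) (by decide)).mp ⟨i, hi, Or.inr he⟩))⟩);
        exact Or.inr (Or.inr (Or.inl ⟨hp', (pvOcc_iff typ "blob" (by decide) (by decide)).mp ⟨i, hi, Or.inr he⟩⟩));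
        exact Or.inr (Or.inr (Or.inr ⟨hp', Or.inl ((pvOcc_iff typ "real" (by decide) (by decide)).mp ⟨i, hi, Or.inr he⟩)⟩));
        exact Or.inr (Or.inr (Or.inr ⟨hp', Or.inr (Or.inl ((pvOcc_iff typ "floa" (by decide) (by decide)).mp ⟨i, hi, Or.inr he⟩))⟩));
        exact Or.inr (Or.inr (Or.inr ⟨hp', Or.inr (Or.inr ((pvOcc_iff typ "doub" (by decide) (by decide)).mp ⟨i, hi, Or.inr he⟩))⟩))]
  · have pack : ∀ (kw : String), kw.toList ≠ [] → (kw.toList.length = 3 ∨ kw.toList.length = 4) →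
        PySem.Chars.isIn kw.toList typ.toList = true → pvGd kw ≤ p →
        (∃ i ∈ PySem.List.pyRange 0 (PySem.Str.len typ) 1,
          min (pvGd (PySem.Str.slice typ (some i) (some (i + 3))))
              (pvGd (PySem.Str.slice typ (some i) (some (i + 4)))) ≤ p) := by
      intro kw hne hm hin hgd
      obtain ⟨i, hi, hor⟩ := (pvOcc_iff typ kw hne hm).mpr hin
      refine ⟨i, hi, ?_⟩
      rw [min_le_iff]
      rcases hor with he | he
      · exact Or.inl (he ▸ hgd)
      · exact Or.inr (he ▸ hgd)
    rintro (⟨hp', hin⟩ | ⟨hp', (hin | hin | hin)⟩ | ⟨hp', hin⟩ | ⟨hp', (hin | hin | hin)⟩)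
    · exact pack "int" (by decide) (by decide) hin (by rw [pvGd_le_iff _ p hp]; tauto)
    · exact pack "char" (by decide) (by decide) hin (by rw [pvGd_le_iff _ p hp]; tauto)
    · exact pack "clob" (by decide) (by decide) hin (by rw [pvGd_le_iff _ p hp]; tauto)
    · exact pack "text" (by decide) (by decide) hin (by rw [pvGd_le_iff _ p hp]; tauto)
    · exact pack "blob" (by decide) (by decide) hin (by rw [pvGd_le_iff _ p hp]; tauto)
    · exact pack "real" (by decide) (by decide) hin (by rw [pvGd_le_iff _ p hp]; tauto)
    · exact pack "floa" (by decide) (by decide) hin (by rw [pvGd_le_iff _ p hp]; tauto)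
    · exact pack "doub" (by decide) (by decide) hin (by rw [pvGd_le_iff _ p hp]; tauto)
lemma pvCore (typ : String) :
    PySem.Dict.getD (PySem.Dict.ofList
      [("", ""), ("TEXT", "s"), ("NUMERIC", "#.#"), ("INTEGER", "##"), ("REAL", "#.#"), ("BLOB", "b")])
      (if PySem.Str.isIn "int" typ then "INTEGER"
       else if ["char", "clob", "text"].any (fun x => PySem.Str.isIn x typ) then "TEXT"
       else if PySem.Str.isIn "blob" typ then "BLOB"
       else if ["real", "floa", "doub"].any (fun x => PySem.Str.isIn x typ) then "REAL"
       else "NUMERIC") "?"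
    = (if ((PySem.List.pyRange 0 (PySem.Str.len typ) 1).foldl
          (fun best i =>
            pvStep (pvStep best (PySem.Str.slice typ (some i) (some (i + 3))))
              (PySem.Str.slice typ (some i) (some (i + 4)))) 4) < 4
       then PySem.List.pyGetD pvABBR
          ((PySem.List.pyRange 0 (PySem.Str.len typ) 1).foldl
            (fun best i =>
              pvStep (pvStep best (PySem.Str.slice typ (some i) (some (i + 3))))
                (PySem.Str.slice typ (some i) (some (i + 4)))) 4) "#.#"
       else "#.#") := by
  set B := (PySem.List.pyRange 0 (PySem.Str.len typ) 1).foldl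
      (fun best i =>
        pvStep (pvStep best (PySem.Str.slice typ (some i) (some (i + 3))))
          (PySem.Str.slice typ (some i) (some (i + 4)))) 4 with hB
  have hbd : 0 ≤ B ∧ B ≤ 4 := by
    rw [hB]
    exact pvFoldl_bounds _
      (fun b i => le_trans (pvStep_le_self _ _) (pvStep_le_self _ _))
      (fun b i hb => pvStep_nonneg _ _ (pvStep_nonneg _ _ hb)) _ 4 (by norm_num)
  have hkey : ∀ p : Int, p < 4 → (B ≤ p ↔ _) := fun p hp => hB ▸ pvKey typ p hp
  by_cases hI : PySem.Str.isIn "int" typ = true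
  · have hI' : PySem.Chars.isIn "int".toList typ.toList = true := by simpa using hI
    have h0 : B ≤ 0 := (hkey 0 (by norm_num)).mpr (Or.inl ⟨le_refl 0, hI'⟩)
    have hv : B = 0 := le_antisymm h0 hbd.1
    rw [if_pos hI, hv]
    decide
  · have hI' : ¬ PySem.Chars.isIn "int".toList typ.toList = true := by simpa using hI
    by_cases hT : (["char", "clob", "text"].any fun x => PySem.Str.isIn x typ) = true
    · have hT' : PySem.Chars.isIn "char".toList typ.toList = true ∨
          PySem.Chars.isIn "clob".toList typ.toList = true ∨
          PySem.Chars.isIn "text".toList typ.toList = true := by simpa using hT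
      have h1 : B ≤ 1 := (hkey 1 (by norm_num)).mpr (Or.inr (Or.inl ⟨by norm_num, hT'⟩))
      have hn0 : ¬ B ≤ 0 := by
        intro h
        rcases (hkey 0 (by norm_num)).mp h with ⟨_, hin⟩ | ⟨hle, _⟩ | ⟨hle, _⟩ | ⟨hle, _⟩
        · exact hI' hin
        all_goals omega
      have hv : B = 1 := by omega
      rw [if_neg hI, if_pos hT, hv]
      decide
    · have hT' : ¬ PySem.Chars.isIn "char".toList typ.toList = true ∧
          ¬ PySem.Chars.isIn "clob".toList typ.toList = true ∧
          ¬ PySem.Chars.isIn "text".toList typ.toList = true := by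
        simpa [not_or] using hT
      by_cases hBl : PySem.Str.isIn "blob" typ = true
      · have hBl' : PySem.Chars.isIn "blob".toList typ.toList = true := by simpa using hBl
        have h2 : B ≤ 2 := (hkey 2 (by norm_num)).mpr (Or.inr (Or.inr (Or.inl ⟨by norm_num, hBl'⟩)))
        have hn1 : ¬ B ≤ 1 := by
          intro h
          rcases (hkey 1 (by norm_num)).mp h with ⟨_, hin⟩ | ⟨_, hin | hin | hin⟩ | ⟨hle, _⟩ | ⟨hle, _⟩
          · exact hI' hin
          · exact hT'.1 hin
          · exact hT'.2.1 hin
          · exact hT'.2.2 hin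
          all_goals omega
        have hv : B = 2 := by omega
        rw [if_neg hI, if_neg hT, if_pos hBl, hv]
        decide
      · have hBl' : ¬ PySem.Chars.isIn "blob".toList typ.toList = true := by simpa using hBl
        by_cases hR : (["real", "floa", "doub"].any fun x => PySem.Str.isIn x typ) = true
        · have hR' : PySem.Chars.isIn "real".toList typ.toList = true ∨
              PySem.Chars.isIn "floa".toList typ.toList = true ∨
              PySem.Chars.isIn "doub".toList typ.toList = true := by simpa using hR
          have h3 : B ≤ 3 := (hkey 3 (by norm_num)).mpr
            (Or.inr (Or.inr (Or.inr ⟨by norm_num, hR'⟩)))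
          have hn2 : ¬ B ≤ 2 := by
            intro h
            rcases (hkey 2 (by norm_num)).mp h with
              ⟨_, hin⟩ | ⟨_, hin | hin | hin⟩ | ⟨_, hin⟩ | ⟨hle, _⟩
            · exact hI' hin
            · exact hT'.1 hin
            · exact hT'.2.1 hin
            · exact hT'.2.2 hin
            · exact hBl' hin
            all_goals omega
          have hv : B = 3 := by omega
          rw [if_neg hI, if_neg hT, if_neg hBl, if_pos hR, hv]
          decide
        · have hR' : ¬ PySem.Chars.isIn "real".toList typ.toList = true ∧
              ¬ PySem.Chars.isIn "floa".toList typ.toList = true ∧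
              ¬ PySem.Chars.isIn "doub".toList typ.toList = true := by
            simpa [not_or] using hR
          have hn3 : ¬ B ≤ 3 := by
            intro h
            rcases (hkey 3 (by norm_num)).mp h with
              ⟨_, hin⟩ | ⟨_, hin | hin | hin⟩ | ⟨_, hin⟩ | ⟨_, hin | hin | hin⟩
            · exact hI' hin
            · exact hT'.1 hin
            · exact hT'.2.1 hin
            · exact hT'.2.2 hin
            · exact hBl' hin
            · exact hR'.1 hin
            · exact hR'.2.1 hin
            · exact hR'.2.2 hin
          have hv : B = 4 := by omega
          rw [if_neg hI, if_neg hT, if_neg hBl, if_neg hR, hv]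
          decide

-- ===== VERDICT (by name: the statement is the Claim_ definition above) =====
set_option maxHeartbeats 1000000 in
theorem short_column_type_py_spec : Claim_equal_short_column_type_py := by
  intro raw_type _
  unfold Spec_short_column_type_py short_column_type_py short_column_type_py_alt
  simp only [List.foldl_cons, List.foldl_nil,
    show (fun (best : Int) (w : String) =>
        match PySem.Dict.get? pvKW w with
        | some p => if p < best then p else best
        | none => best) = pvStep from rfl]
  exact pvCore (PySem.Str.lower raw_type)
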